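-- pv_equiv track=rewrite | github.com/kaiuerlichs/advent_of_code_25 | src/aoc/solutions/day_02.py | _check_for_patterns
-- ===== SOURCE A (Python) =====
-- def _check_for_patterns(id: int) -> bool:
--     str_id = str(id)
--     len_id = len(str_id)
--     for i in range(len_id-1):
--         if len_id % (i+1) != 0: continue
--         segments = [str_id[j:j+i+1] for j in range(0, len_id, i+1)]
--         if all(s==segments[0] for s in segments): return True
--     return False
-- ===== SOURCE B (Python) =====
-- def _check_for_patterns(id: int) -> bool:
--     s = str(id)
--     return s in (s + s)[1:-1]
-- ===== Notes on version B (the rewrite author's own statement) =====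
-- stated objective: idiomatic
-- what changed: Replaced the loop over candidate segment lengths with divisor test and explicit segment-list comparison by the classic string-doubling idiom: s is a proper repetition iff s occurs inside (s+s)[1:-1], a single substring-membership test.
import Mathlib
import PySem

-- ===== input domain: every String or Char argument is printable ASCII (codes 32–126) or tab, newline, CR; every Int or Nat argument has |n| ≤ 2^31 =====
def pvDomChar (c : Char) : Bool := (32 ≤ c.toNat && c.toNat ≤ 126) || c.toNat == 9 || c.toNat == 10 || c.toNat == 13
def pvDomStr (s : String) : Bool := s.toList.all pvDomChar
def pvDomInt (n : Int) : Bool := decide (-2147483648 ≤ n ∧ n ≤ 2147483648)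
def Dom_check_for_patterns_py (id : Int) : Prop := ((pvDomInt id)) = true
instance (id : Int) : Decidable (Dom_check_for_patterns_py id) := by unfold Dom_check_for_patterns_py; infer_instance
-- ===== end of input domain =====

-- B replaces A's loop over divisor segment lengths (with an explicit segment list) by the string-doubling
-- idiom `s in (s + s)[1:-1]` — a single substring-membership test (objective: idiomatic).

-- ===== PORT A =====
-- literal port of A; the generator `all(s==segments[0] for s in segments)` only evaluates
-- `segments[0]` when `segments` is nonempty, where it equals `segments.headD []` (exact).
def check_for_patterns_py (id : Int) : Bool :=
  let str_id := PySem.Int.toChars id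
  let len_id := str_id.length
  (PySem.List.pyRange 0 ((len_id : Int) - 1) 1).any fun i =>
    if PySem.Int.mod (len_id : Int) (i + 1) ≠ 0 then false
    else
      let segments := (PySem.List.pyRange 0 (len_id : Int) (i + 1)).map
        (fun j => PySem.List.slice str_id (some j) (some (j + i + 1)))
      segments.all (fun s => s == segments.headD [])

-- ===== PORT B =====
-- literal port of Source B on the PySem.Chars (code-point list) side: s = str(id); s in (s + s)[1:-1]
def check_for_patterns_py_alt (id : Int) : Bool :=
  let s := PySem.Int.toChars id
  PySem.Chars.isIn s (PySem.Chars.slice (s ++ s) (some 1) (some (-1)))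

-- ===== PRECONDITION & SPEC =====
def Spec_check_for_patterns_py (id : Int) (out : Bool) : Prop := out = check_for_patterns_py_alt id
instance (id : Int) (out : Bool) : Decidable (Spec_check_for_patterns_py id out) := by unfold Spec_check_for_patterns_py; infer_instance

-- ===== CLAIM (what is proved, stated in full; the proofs are below) =====
def Claim_equal_check_for_patterns_py : Prop := ∀ (id : Int), Dom_check_for_patterns_py id → Spec_check_for_patterns_py id (check_for_patterns_py id)

-- ===== LEMMAS AND PROOFS =====

-- str(id) is never empty
theorem pv_toDigitsCore_len (b : ℕ) : ∀ (fuel n : ℕ) (l : List Char),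
    l.length ≤ (Nat.toDigitsCore b fuel n l).length := by
  intro fuel
  induction fuel with
  | zero => intro n l; simp [Nat.toDigitsCore]
  | succ f ih =>
    intro n l
    simp only [Nat.toDigitsCore]
    split
    · simp
    · exact le_trans (by simp) (ih _ _)

theorem pv_toDigitsCore_len_lt (b : ℕ) (f n : ℕ) (l : List Char) :
    l.length < (Nat.toDigitsCore b (f + 1) n l).length := by
  simp only [Nat.toDigitsCore]
  split
  · simp
  · exact lt_of_lt_of_le (by simp) (pv_toDigitsCore_len b f _ _)

theorem pv_toChars_ne_nil (m : ℤ) : PySem.Int.toChars m ≠ [] := by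
  unfold PySem.Int.toChars
  split
  · simp
  · unfold Nat.toDigits
    intro h
    have hlen := pv_toDigitsCore_len_lt 10 m.toNat m.toNat []
    rw [h] at hlen
    simp at hlen

-- chunks all equal to the first chunk  ↔  HasPeriod, for a divisor chunk size
theorem pv_chunks_iff (w : List Char) (d : ℕ) (hd : 0 < d) (hdvd : d ∣ w.length) :
    (∀ j : ℕ, j < w.length → d ∣ j → (w.drop j).take d = w.take d) ↔ w.HasPeriod d := by
  constructor
  · intro hch
    rw [List.hasPeriod_iff_forall_getElem?_mod]
    intro i hi
    have h1 : d * (i / d) ≤ i := by rw [Nat.mul_comm]; exact Nat.div_mul_le_self i d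
    have hc := hch (d * (i / d)) (by omega) ⟨i / d, rfl⟩
    have h2 : i % d < d := Nat.mod_lt _ hd
    have e1 : ((w.drop (d * (i / d))).take d)[i % d]? = w[d * (i / d) + i % d]? := by
      rw [List.getElem?_take, if_pos h2, List.getElem?_drop]
    have e2 : (w.take d)[i % d]? = w[i % d]? := by
      rw [List.getElem?_take, if_pos h2]
    rw [hc, e2] at e1
    rw [e1, Nat.div_add_mod]
  · intro hp j hj hdj
    have hjd : j + d ≤ w.length := by
      obtain ⟨c, rfl⟩ := hdj
      obtain ⟨mm, hm⟩ := hdvd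
      have hcm : c < mm := by
        rcases Nat.lt_or_ge c mm with h | h
        · exact h
        · have := Nat.mul_le_mul_left d h
          omega
      have h3 : d * (c + 1) ≤ d * mm := Nat.mul_le_mul_left d hcm
      have h4 : d * (c + 1) = d * c + d := by ring
      omega
    apply List.ext_getElem?
    intro t
    by_cases ht : t < d
    · rw [List.getElem?_take, if_pos ht, List.getElem?_drop,
        List.getElem?_take, if_pos ht]
      rw [List.hasPeriod_iff_forall_getElem?_mod] at hp
      rw [hp (j + t) (by omega), hp t (by omega)]
      congr 1
      obtain ⟨c, rfl⟩ := hdj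
      rw [Nat.mul_add_mod]
    · rw [List.getElem?_take, if_neg ht, List.getElem?_take, if_neg ht]

-- the `segments` computation of port A, characterized
theorem pv_segall (w : List Char) (d : ℕ) (hd : 0 < d) (hn : 0 < w.length) (hdvd : d ∣ w.length) :
    (((PySem.List.pyRange 0 (w.length : ℤ) (d : ℤ)).map
        (fun j => PySem.List.slice w (some j) (some (j + (d : ℤ))))).all
      (fun s => s == ((PySem.List.pyRange 0 (w.length : ℤ) (d : ℤ)).map
        (fun j => PySem.List.slice w (some j) (some (j + (d : ℤ))))).headD [])) = true
    ↔ w.HasPeriod d := by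
  have hd0 : (0 : ℤ) < (d : ℤ) := by exact_mod_cast hd
  have hpos : 0 < (((w.length : ℤ) - 0 + (d : ℤ) - 1) / (d : ℤ)).toNat := by
    have h1 : (1 : ℤ) ≤ ((w.length : ℤ) - 0 + (d : ℤ) - 1) / (d : ℤ) := by
      rw [Int.le_ediv_iff_mul_le hd0]
      have h2 : (1 : ℤ) ≤ (w.length : ℤ) := by exact_mod_cast hn
      omega
    omega
  obtain ⟨c, hc⟩ : ∃ c, (((w.length : ℤ) - 0 + (d : ℤ) - 1) / (d : ℤ)).toNat = c + 1 :=
    ⟨(((w.length : ℤ) - 0 + (d : ℤ) - 1) / (d : ℤ)).toNat - 1, by omega⟩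
  have hhead : ((PySem.List.pyRange 0 (w.length : ℤ) (d : ℤ)).map
      (fun j => PySem.List.slice w (some j) (some (j + (d : ℤ))))).headD [] = w.take d := by
    rw [List.headD_eq_head?, List.head?_map, PySem.List.pyRange_of_pos _ _ hd0,
      if_pos (show (0 : ℤ) < (w.length : ℤ) by exact_mod_cast hn), hc, List.range_succ_eq_map]
    simp [pysem, Function.comp_def]
  rw [List.all_eq_true, hhead]
  constructor
  · intro hall
    rw [← pv_chunks_iff w d hd hdvd]
    intro j hj hdj
    have hmem : ((j : ℕ) : ℤ) ∈ PySem.List.pyRange 0 (w.length : ℤ) (d : ℤ) := by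
      rw [PySem.List.mem_pyRange_iff_of_pos hd0]
      refine ⟨Int.natCast_nonneg j, by exact_mod_cast hj, ?_⟩
      simpa using Int.natCast_dvd_natCast.mpr hdj
    have hx := hall _ (List.mem_map_of_mem hmem)
    rw [beq_iff_eq, PySem.List.slice_natCast_add] at hx
    exact hx
  · intro hp x hx
    obtain ⟨j, hj, rfl⟩ := List.mem_map.mp hx
    rw [PySem.List.mem_pyRange_iff_of_pos hd0] at hj
    obtain ⟨hj0, hjn, hjdvd⟩ := hj
    rw [beq_iff_eq]
    obtain ⟨jn, rfl⟩ : ∃ jn : ℕ, j = (jn : ℤ) := ⟨j.toNat, (Int.toNat_of_nonneg hj0).symm⟩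
    rw [PySem.List.slice_natCast_add]
    refine (pv_chunks_iff w d hd hdvd).mpr hp jn (by exact_mod_cast hjn) ?_
    rw [sub_zero] at hjdvd
    exact_mod_cast hjdvd

-- port A returns true iff the digit string has a proper divisor-length period
theorem pv_AP (id : ℤ) :
    check_for_patterns_py id = true ↔
      ∃ d : ℕ, 0 < d ∧ d < (PySem.Int.toChars id).length ∧
        d ∣ (PySem.Int.toChars id).length ∧ (PySem.Int.toChars id).HasPeriod d := by
  unfold check_for_patterns_py
  simp only [List.any_eq_true]
  set w := PySem.Int.toChars id with hwdef
  constructor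
  · rintro ⟨i, hmem, hbody⟩
    rw [PySem.List.mem_pyRange_iff_of_pos one_pos] at hmem
    obtain ⟨hi0, hin, -⟩ := hmem
    set d : ℕ := i.toNat + 1 with hdd
    have hid : i + 1 = (d : ℤ) := by omega
    have hdn : d < w.length := by omega
    rw [hid] at hbody
    have hlam : (fun j => PySem.List.slice w (some j) (some (j + i + 1))) =
        (fun j => PySem.List.slice w (some j) (some (j + (d : ℤ)))) := by
      funext j; rw [show j + i + 1 = j + (d : ℤ) by omega]
    rw [hlam] at hbody
    by_cases hdvd : ((d : ℕ) : ℤ) ∣ (w.length : ℤ)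
    · have hmod : PySem.Int.mod (w.length : ℤ) (d : ℤ) = 0 :=
        (PySem.Int.mod_eq_zero_iff_dvd _ _).mpr hdvd
      rw [if_neg (by simp [hmod])] at hbody
      exact ⟨d, by omega, hdn, by exact_mod_cast hdvd,
        (pv_segall w d (by omega) (by omega) (by exact_mod_cast hdvd)).mp hbody⟩
    · rw [if_pos (by simp [PySem.Int.mod_eq_zero_iff_dvd]; exact hdvd)] at hbody
      exact absurd hbody (by simp)
  · rintro ⟨d, hd0, hdn, hdvd, hp⟩
    refine ⟨(d : ℤ) - 1, ?_, ?_⟩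
    · rw [PySem.List.mem_pyRange_iff_of_pos one_pos]
      exact ⟨by omega, by omega, one_dvd _⟩
    · rw [show (d : ℤ) - 1 + 1 = (d : ℤ) by ring]
      have hlam : (fun j => PySem.List.slice w (some j) (some (j + ((d : ℤ) - 1) + 1))) =
          (fun j => PySem.List.slice w (some j) (some (j + (d : ℤ)))) := by
        funext j; rw [show j + ((d : ℤ) - 1) + 1 = j + (d : ℤ) by ring]
      rw [hlam]
      rw [if_neg (by simp only [PySem.Int.mod_eq_zero_iff_dvd, ne_eq, not_not]; exact_mod_cast hdvd)]
      exact (pv_segall w d hd0 (by omega) hdvd).mpr hp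

-- the slice (s + s)[1:-1]
theorem pv_slice_eq (w : List Char) (hw : w ≠ []) :
    PySem.List.slice (w ++ w) (some 1) (some (-1)) = w.tail ++ w.dropLast := by
  have hn : 0 < w.length := List.length_pos_of_ne_nil hw
  simp [PySem.List.slice]
  rw [show min 1 (w.length + w.length) = 1 by omega, List.drop_one, List.tail_append_of_ne_nil hw]
  rw [show w.length + w.length - 1 - 1 = (w.tail ++ w).length - 1 from by
    simp only [List.length_append, List.length_tail]; omega]
  rw [← List.dropLast_eq_take]
  simp [List.dropLast_append, List.isEmpty_iff, hw]

-- occurrence of w inside w.tail ++ w.dropLast  ↔  a nontrivial self-rotation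
theorem pv_infix_iff (w : List Char) (hw : w ≠ []) :
    w <:+: w.tail ++ w.dropLast ↔ ∃ q : ℕ, 0 < q ∧ q < w.length ∧ w.rotate q = w := by
  have hn : 0 < w.length := List.length_pos_of_ne_nil hw
  constructor
  · rintro ⟨s, t, heq⟩
    have hlen : s.length + (w.length + t.length) = (w.length - 1) + (w.length - 1) := by
      have hl := congrArg List.length heq
      simpa [List.length_append, List.length_tail, List.length_dropLast] using hl
    set q := s.length + 1 with hq
    refine ⟨q, by omega, by omega, ?_⟩
    have hq_le : q ≤ w.length := by omega
    have e1 : (w ++ w).drop 1 = w.tail ++ w := by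
      rw [List.drop_one, List.tail_append_of_ne_nil hw]
    have e2 : w.tail ++ w = w.tail ++ (w.dropLast ++ [w.getLast hw]) :=
      congrArg (w.tail ++ ·) (List.dropLast_append_getLast hw).symm
    have e3 : w.tail ++ w = s ++ (w ++ (t ++ [w.getLast hw])) := by
      rw [e2, ← List.append_assoc, ← heq]
      simp [List.append_assoc]
    have e0 : (w ++ w).drop q = ((w ++ w).drop 1).drop s.length := by
      rw [List.drop_drop]
      congr 1
      omega
    have e4 : (w ++ w).drop q = w ++ (t ++ [w.getLast hw]) := by
      rw [e0, e1, e3]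
      exact List.drop_left' rfl
    have e5 : (w ++ w).drop q = w.drop q ++ w := by
      conv_lhs => rw [show w ++ w = (w.take q ++ w.drop q) ++ w from by rw [List.take_append_drop]]
      rw [List.append_assoc]
      exact List.drop_left' (by simp [List.length_take]; omega)
    have h3 : w.drop q ++ w = w ++ (t ++ [w.getLast hw]) := by rw [← e5, e4]
    have h4 := congrArg (List.take w.length) h3
    rw [List.take_left' rfl, List.take_append,
      List.take_of_length_le (by simp : (w.drop q).length ≤ w.length),
      show w.length - (w.drop q).length = q from by simp only [List.length_drop]; omega] at h4
    rw [List.rotate_eq_drop_append_take hq_le]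
    exact h4
  · rintro ⟨q, hq0, hqn, hrot⟩
    rw [List.rotate_eq_drop_append_take (le_of_lt hqn)] at hrot
    set u := w.take q with hu
    set v := w.drop q with hv
    have huv : u ++ v = w := List.take_append_drop q w
    have hvu : v ++ u = w := hrot
    have hune : u ≠ [] := by
      intro h
      have hl := congrArg List.length h
      rw [hu] at hl
      simp only [List.length_take, List.length_nil] at hl
      omega
    have hvne : v ≠ [] := by
      intro h
      have hl := congrArg List.length h
      rw [hv] at hl
      simp only [List.length_drop, List.length_nil] at hl
      omega
    refine ⟨u.tail, v.dropLast, ?_⟩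
    have hdl : v ++ u.dropLast = u ++ v.dropLast := by
      have e1 : (v ++ u).dropLast = v ++ u.dropLast := by simp [List.dropLast_append, hune]
      have e2 : (u ++ v).dropLast = u ++ v.dropLast := by simp [List.dropLast_append, hvne]
      rw [← e1, ← e2, huv, hvu]
    calc u.tail ++ w ++ v.dropLast = u.tail ++ (v ++ u) ++ v.dropLast := by rw [hvu]
      _ = u.tail ++ (v ++ (u ++ v.dropLast)) := by simp [List.append_assoc]
      _ = u.tail ++ (v ++ (v ++ u.dropLast)) := by rw [← hdl]
      _ = (u.tail ++ v) ++ (v ++ u.dropLast) := by simp [List.append_assoc]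
      _ = (u ++ v).tail ++ (v ++ u).dropLast := by
            rw [List.tail_append_of_ne_nil hune]
            simp [List.dropLast_append, hune]
      _ = w.tail ++ w.dropLast := by rw [huv, hvu]

-- port B returns true iff the digit string has a nontrivial self-rotation
theorem pv_BP (id : ℤ) :
    check_for_patterns_py_alt id = true ↔
      ∃ q : ℕ, 0 < q ∧ q < (PySem.Int.toChars id).length ∧
        (PySem.Int.toChars id).rotate q = PySem.Int.toChars id := by
  unfold check_for_patterns_py_alt
  set w := PySem.Int.toChars id with hwdef
  have hw : w ≠ [] := pv_toChars_ne_nil id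
  rw [PySem.Chars.isIn_iff_infix, PySem.Chars.slice_eq_listSlice, pv_slice_eq w hw]
  exact pv_infix_iff w hw

theorem pv_period_of_rot (w : List Char) (q : ℕ) (hq : q ≤ w.length) (h : w.rotate q = w) :
    w.HasPeriod q := by
  rw [List.rotate_eq_drop_append_take hq] at h
  rw [List.hasPeriod_iff_getElem?]
  intro i hi
  conv_lhs => rw [← h]
  rw [List.getElem?_append_left (by simp only [List.length_drop]; omega), List.getElem?_drop]
  congr 1
  omega

theorem pv_rot_of_period (w : List Char) (d : ℕ) (hdn : d ≤ w.length) (hdvd : d ∣ w.length)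
    (hp : w.HasPeriod d) : w.rotate d = w := by
  rcases Nat.eq_zero_or_pos d with rfl | hd0
  · simp
  rw [List.rotate_eq_drop_append_take hdn]
  rw [List.hasPeriod_iff_forall_getElem?_mod] at hp
  apply List.ext_getElem?
  intro i
  by_cases hi : i < w.length
  · by_cases hi1 : i < w.length - d
    · rw [List.getElem?_append_left (by simp only [List.length_drop]; omega), List.getElem?_drop]
      rw [hp (d + i) (by omega), hp i hi]
      congr 1
      rw [Nat.add_comm d i, Nat.add_mod_right]
    · rw [List.getElem?_append_right (by simp only [List.length_drop]; omega)]
      simp only [List.length_drop]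
      rw [List.getElem?_take, if_pos (by omega), hp (i - (w.length - d)) (by omega), hp i hi]
      congr 1
      obtain ⟨m, hm⟩ := hdvd
      have h2 : d ∣ (w.length - d) := by
        refine ⟨m - 1, ?_⟩
        rw [hm, Nat.mul_sub, Nat.mul_one]
      obtain ⟨k, hk⟩ := h2
      have h1 : i - (w.length - d) + d * k = i := by rw [← hk]; omega
      conv_rhs => rw [← h1]
      rw [Nat.add_mul_mod_self_left]
  · have hlen1 : (List.drop d w ++ List.take d w).length ≤ i := by
      simp only [List.length_append, List.length_drop, List.length_take]
      omega
    have hlen2 : w.length ≤ i := by omega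
    rw [List.getElem?_eq_none hlen1, List.getElem?_eq_none hlen2]

-- the combinatorial core: nontrivial self-rotation ↔ proper divisor period (via Fine–Wilf)
theorem pv_rot_iff_period (w : List Char) :
    (∃ q : ℕ, 0 < q ∧ q < w.length ∧ w.rotate q = w) ↔
      (∃ d : ℕ, 0 < d ∧ d < w.length ∧ d ∣ w.length ∧ w.HasPeriod d) := by
  constructor
  · rintro ⟨q, hq0, hqn, hrot⟩
    refine ⟨Nat.gcd q w.length, Nat.gcd_pos_of_pos_left _ hq0, ?_, Nat.gcd_dvd_right _ _, ?_⟩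
    · exact lt_of_le_of_lt (Nat.le_of_dvd hq0 (Nat.gcd_dvd_left _ _)) hqn
    · have per_q : w.HasPeriod q := pv_period_of_rot w q (le_of_lt hqn) hrot
      have hrot2 : w.rotate (w.length - q) = w := by
        calc w.rotate (w.length - q) = (w.rotate q).rotate (w.length - q) := by rw [hrot]
          _ = w.rotate (q + (w.length - q)) := List.rotate_rotate w q _
          _ = w.rotate w.length := by congr 1; omega
          _ = w := List.rotate_length w
      have per_nq : w.HasPeriod (w.length - q) := pv_period_of_rot w _ (Nat.sub_le _ _) hrot2
      have fw := per_q.gcd per_nq (by omega)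
      have hg : Nat.gcd q (w.length - q) = Nat.gcd q w.length := by
        rw [Nat.gcd_comm q (w.length - q), Nat.gcd_sub_self_left (le_of_lt hqn), Nat.gcd_comm]
      rwa [hg] at fw
  · rintro ⟨d, hd0, hdn, hdvd, hp⟩
    exact ⟨d, hd0, hdn, pv_rot_of_period w d (le_of_lt hdn) hdvd hp⟩

-- ===== VERDICT (by name: the statement is the Claim_ definition above) =====
theorem check_for_patterns_py_spec : Claim_equal_check_for_patterns_py := by
  intro id _
  unfold Spec_check_for_patterns_py
  rw [Bool.eq_iff_iff, pv_AP, pv_BP, pv_rot_iff_period]
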